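-- pv_equiv track=rewrite | github.com/posl/comment_recommendation | script/mod_gen/3_time/zh/238_B/6.py | calMaxAngle
-- ===== SOURCE A (Python) =====
-- def calMaxAngle(N, A):
--     maxAngle = 0
--     for i in range(N):
--         angle = 0
--         for j in range(N):
--             if i == j:
--                 continue
--             if A[i] > A[j]:
--                 angle += (A[i] - A[j])
--             else:
--                 angle += (360 - A[j] + A[i])
--         if maxAngle < angle:
--             maxAngle = angle
--     return maxAngle
-- ===== SOURCE B (Python) =====
-- def calMaxAngle(N, A):
--     if N <= 0:
--         return 0
--     vals = sorted(A[:N])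
--     total = sum(vals)
--     best = 0
--     for idx, v in enumerate(vals):
--         best = max(best, N * v - total + 360 * (N - idx - 1))
--     return best
-- ===== Notes on version B (the rewrite author's own statement) =====
-- stated objective: faster
-- what changed: Replaces the O(N^2) double loop by sort + one pass: each candidate angle is N*A[i] - sum(A) + 360*(count of elements >= A[i]) - 360, and in the sorted array the count of elements >= vals[idx] is at least N - idx, with equality at the first occurrence, so a single scan of the sorted prefix finds the same maximum.
import Mathlib
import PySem

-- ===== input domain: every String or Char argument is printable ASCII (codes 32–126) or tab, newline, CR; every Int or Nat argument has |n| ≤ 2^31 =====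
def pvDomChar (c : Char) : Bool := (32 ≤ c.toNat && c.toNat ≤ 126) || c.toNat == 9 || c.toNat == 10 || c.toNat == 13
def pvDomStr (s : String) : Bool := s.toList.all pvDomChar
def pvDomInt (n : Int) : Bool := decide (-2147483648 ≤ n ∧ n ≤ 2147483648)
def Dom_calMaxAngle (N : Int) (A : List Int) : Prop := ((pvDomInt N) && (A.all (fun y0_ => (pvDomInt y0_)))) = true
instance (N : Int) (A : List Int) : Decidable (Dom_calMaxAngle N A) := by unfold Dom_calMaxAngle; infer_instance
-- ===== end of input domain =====

-- B replaces A's O(N^2) double loop by sort + a single pass over the sorted prefix (same return value).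

-- ===== PORT A =====
def calMaxAngle (N : Int) (A : List Int) : Int :=
  (PySem.List.pyRange 0 N 1).foldl (fun maxAngle i =>
    let angle := (PySem.List.pyRange 0 N 1).foldl (fun angle j =>
      if i == j then angle
      else if PySem.List.pyGetD A i 0 > PySem.List.pyGetD A j 0 then
        angle + (PySem.List.pyGetD A i 0 - PySem.List.pyGetD A j 0)
      else
        angle + (360 - PySem.List.pyGetD A j 0 + PySem.List.pyGetD A i 0)) 0
    if maxAngle < angle then angle else maxAngle) 0

-- ===== PORT B =====
def calMaxAngle_alt (N : Int) (A : List Int) : Int :=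
  if N ≤ 0 then 0
  else
    let vals := PySem.List.sorted (PySem.List.slice A none (some N)) (fun x => x) false
    let total := vals.sum
    (PySem.List.enumerate vals 0).foldl (fun best p =>
      max best (N * p.2 - total + 360 * (N - p.1 - 1))) 0

-- ===== PRECONDITION & SPEC =====
-- Pre_ excludes exactly the inputs with N > len(A), on which A raises IndexError.
def Pre_calMaxAngle (N : Int) (A : List Int) : Prop := N ≤ (A.length : Int)
instance (N : Int) (A : List Int) : Decidable (Pre_calMaxAngle N A) := by unfold Pre_calMaxAngle; infer_instance
def pvWitness_calMaxAngle : Int × List Int := (3, [10, 200, 350])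
def Spec_calMaxAngle (N : Int) (A : List Int) (out : Int) : Prop := out = calMaxAngle_alt N A
instance (N : Int) (A : List Int) (out : Int) : Decidable (Spec_calMaxAngle N A out) := by unfold Spec_calMaxAngle; infer_instance

-- ===== CLAIM (what is proved, stated in full; the proofs are below) =====
def Claim_equal_calMaxAngle : Prop := ∀ (N : Int) (A : List Int), Dom_calMaxAngle N A → Pre_calMaxAngle N A → Spec_calMaxAngle N A (calMaxAngle N A)

-- ===== LEMMAS AND PROOFS =====

-- per-element contribution of the inner loop of A
def pvG (v a : Int) : Int := if v > a then v - a else 360 - a + v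

-- the common candidate value for value v over prefix L
def pvH (N : Int) (L : List Int) (v : Int) : Int :=
  N * v - L.sum + 360 * ((L.countP (fun a => v ≤ a) : Int)) - 360

theorem pvSumG (v : Int) (l : List Int) :
    (l.map (pvG v)).sum = (l.length : Int) * v - l.sum + 360 * ((l.countP (fun a => v ≤ a) : Int)) := by
  induction l with
  | nil => simp
  | cons a t ih =>
    simp only [List.map_cons, List.sum_cons, List.countP_cons, List.length_cons, ih, pvG]
    by_cases h : v > a
    · rw [if_pos h]
      have hna : ¬ (v ≤ a) := by omega
      simp only [hna, decide_false, Bool.false_eq_true, if_false, Nat.cast_add]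
      push_cast
      ring
    · rw [if_neg h]
      have ha : v ≤ a := by omega
      simp only [ha, decide_true, if_true, Nat.cast_add]
      push_cast
      ring

-- max-fold equality by mutual domination
theorem pvFoldMaxEq (l₁ l₂ : List Int)
    (h₁ : ∀ x ∈ l₁, ∃ y ∈ l₂, x ≤ y) (h₂ : ∀ y ∈ l₂, ∃ x ∈ l₁, y ≤ x) :
    l₁.foldl max 0 = l₂.foldl max 0 := by
  have key : ∀ (a b : List Int), (∀ x ∈ a, ∃ y ∈ b, x ≤ y) → a.foldl max 0 ≤ b.foldl max 0 := by
    intro a b hab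
    rcases PySem.List.foldl_max_mem a 0 with h | h
    · rw [h]; exact (PySem.List.le_foldl_max b 0).1
    · rcases hab _ h with ⟨y, hy, hxy⟩
      calc a.foldl max 0 ≤ y := hxy
        _ ≤ b.foldl max 0 := (PySem.List.le_foldl_max b 0).2 y hy
  exact le_antisymm (key l₁ l₂ h₁) (key l₂ l₁ h₂)


def pvCand (N S : Int) (p : Int × Int) : Int := N * p.2 - S + 360 * (N - p.1 - 1)

theorem pvCount_split (l : List Int) (p : Int → Bool) (k : Nat) :
    l.countP p = (l.take k).countP p + (l.drop k).countP p := by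
  conv_lhs => rw [← List.take_append_drop k l]
  rw [List.countP_append]

-- in a nondecreasing list, at least length-k elements are ≥ l[k]
theorem pvCount_ge (l : List Int) (hs : l.Pairwise (· ≤ ·)) (k : Nat) (hk : k < l.length) :
    l.length - k ≤ l.countP (fun a => l[k] ≤ a) := by
  have hpg := List.pairwise_iff_getElem.mp hs
  have hd : (l.drop k).countP (fun a => l[k] ≤ a) = (l.drop k).length := by
    rw [List.countP_eq_length]
    intro a ha
    obtain ⟨i, hi, rfl⟩ := List.mem_iff_getElem.mp ha
    rw [List.length_drop] at hi
    rw [List.getElem_drop]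
    rcases Nat.eq_zero_or_pos i with h | h
    · simp [h]
    · simpa using hpg k (k+i) (by omega) (by omega) (by omega)
  rw [pvCount_split l _ k, hd]
  simp

-- in a nondecreasing list, the first position of the ≥-v suffix witnesses the count
theorem pvFirst (l : List Int) (hs : l.Pairwise (· ≤ ·)) (v : Int) (hv : v ∈ l) :
    ∃ k : Nat, ∃ _ : k < l.length, v ≤ l[k] ∧ l.countP (fun a => v ≤ a) = l.length - k := by
  have hpg := List.pairwise_iff_getElem.mp hs
  have hc1 : 0 < l.countP (fun a => v ≤ a) := List.countP_pos_iff.mpr ⟨v, hv, by simp⟩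
  have hcle : l.countP (fun a => v ≤ a) ≤ l.length := List.countP_le_length
  set c := l.countP (fun a => v ≤ a) with hc
  refine ⟨l.length - c, by omega, ?_, by omega⟩
  by_contra hlt
  push_neg at hlt
  have hk : l.length - c < l.length := by omega
  have ht : (l.take (l.length - c + 1)).countP (fun a => v ≤ a) = 0 := by
    rw [List.countP_eq_zero]
    intro a ha
    obtain ⟨i, hi, rfl⟩ := List.mem_iff_getElem.mp ha
    rw [List.length_take] at hi
    rw [List.getElem_take]
    rcases Nat.lt_or_ge i (l.length - c) with h | h
    · have := hpg i (l.length - c) (by omega) hk h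
      simp only [decide_eq_true_eq]
      push_neg
      omega
    · have hieq : i = l.length - c := by omega
      subst hieq
      simp only [decide_eq_true_eq]
      push_neg
      omega
  have hsplit := pvCount_split l (fun a => decide (v ≤ a)) (l.length - c + 1)
  have hdle : (l.drop (l.length - c + 1)).countP (fun a => v ≤ a) ≤ (l.drop (l.length - c + 1)).length :=
    List.countP_le_length
  rw [List.length_drop] at hdle
  omega

theorem pvG_self (v : Int) : pvG v v = 360 := by
  rw [pvG, if_neg (lt_irrefl v)]; ring

theorem pvMapGet (A : List Int) (N : Int) (hlen : N ≤ (A.length : Int)) :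
    (PySem.List.pyRange 0 N 1).map (fun j => PySem.List.pyGetD A j 0) = A.take N.toNat := by
  apply List.ext_getElem
  · simp [PySem.List.length_pyRange_one]
    omega
  · intro k h1 h2
    simp only [List.getElem_map, PySem.List.getElem_pyRange_one, List.getElem_take, zero_add]
    rw [PySem.List.pyGetD_natCast]
    rw [List.getD_eq_getElem]

theorem pvInner (N i : Int) (A : List Int) (h0 : 0 ≤ i) (hiN : i < N) (hlen : N ≤ (A.length : Int)) :
    (PySem.List.pyRange 0 N 1).foldl (fun angle j =>
      if i == j then angle
      else if PySem.List.pyGetD A i 0 > PySem.List.pyGetD A j 0 then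
        angle + (PySem.List.pyGetD A i 0 - PySem.List.pyGetD A j 0)
      else
        angle + (360 - PySem.List.pyGetD A j 0 + PySem.List.pyGetD A i 0)) 0
    = ((A.take N.toNat).map (pvG (PySem.List.pyGetD A i 0))).sum - 360 := by
  set ai := PySem.List.pyGetD A i 0 with hai
  have hcongr : ∀ (acc : Int), ∀ j ∈ PySem.List.pyRange 0 N 1,
      (if i == j then acc
       else if ai > PySem.List.pyGetD A j 0 then acc + (ai - PySem.List.pyGetD A j 0)
       else acc + (360 - PySem.List.pyGetD A j 0 + ai))
      = acc + (if i = j then 0 else pvG ai (PySem.List.pyGetD A j 0)) := by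
    intro acc j _
    by_cases h : i = j
    · simp [h]
    · simp only [beq_iff_eq, h, if_false, pvG]
      split_ifs <;> ring
  rw [PySem.List.foldl_congr_mem _ _ _ 0 hcongr, PySem.List.foldl_add]
  have hsplit : PySem.List.pyRange 0 N 1 = PySem.List.pyRange 0 i 1 ++ i :: PySem.List.pyRange (i+1) N 1 := by
    rw [PySem.List.pyRange_one_append 0 i N h0 (le_of_lt hiN), PySem.List.pyRange_one_cons hiN]
  have htake : (A.take N.toNat).map (pvG ai) =
      (PySem.List.pyRange 0 N 1).map (fun j => pvG ai (PySem.List.pyGetD A j 0)) := by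
    rw [← pvMapGet A N hlen, List.map_map]
    rfl
  have hleft : ∀ l : List Int, (∀ j ∈ l, j ≠ i) →
      l.map (fun j => if i = j then 0 else pvG ai (PySem.List.pyGetD A j 0))
      = l.map (fun j => pvG ai (PySem.List.pyGetD A j 0)) := by
    intro l hl
    apply List.map_congr_left
    intro j hj
    rw [if_neg (fun h => hl j hj h.symm)]
  have hiA : PySem.List.pyGetD A i 0 = ai := rfl
  rw [htake, hsplit]
  simp only [List.map_append, List.map_cons, List.sum_append, List.sum_cons]
  rw [hleft _ (fun j hj => by have := PySem.List.mem_pyRange_one.mp hj; omega),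
      hleft _ (fun j hj => by have := PySem.List.mem_pyRange_one.mp hj; omega)]
  rw [hiA, pvG_self]
  simp
  ring

theorem pvMain (N : Int) (A : List Int) (hpre : N ≤ (A.length : Int)) :
    calMaxAngle N A = calMaxAngle_alt N A := by
  by_cases hN : N ≤ 0
  · unfold calMaxAngle calMaxAngle_alt
    rw [PySem.List.pyRange_one_eq_nil hN, if_pos hN]
    rfl
  · push_neg at hN
    unfold calMaxAngle calMaxAngle_alt
    rw [if_neg (by omega)]
    rw [PySem.List.slice_to A (by omega : (0:Int) ≤ N)]
    set L := A.take N.toNat with hL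
    set vals := PySem.List.sorted L (fun x => x) false with hvals
    have hperm : vals.Perm L := PySem.List.sorted_perm L (fun x => x) false
    have hlenL : L.length = N.toNat := by
      rw [hL, List.length_take]; omega
    have hlenv : vals.length = N.toNat := by
      rw [hvals, PySem.List.length_sorted]; exact hlenL
    have hpair : vals.Pairwise (· ≤ ·) := PySem.List.sorted_pairwise L (fun x => x)
    have hsum : vals.sum = L.sum := hperm.sum_eq
    have hcnt : ∀ v : Int, vals.countP (fun a => v ≤ a) = L.countP (fun a => v ≤ a) :=
      fun v => hperm.countP_eq _
    -- A side
    have hAside : (PySem.List.pyRange 0 N 1).foldl (fun maxAngle i =>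
        let angle := (PySem.List.pyRange 0 N 1).foldl (fun angle j =>
          if i == j then angle
          else if PySem.List.pyGetD A i 0 > PySem.List.pyGetD A j 0 then
            angle + (PySem.List.pyGetD A i 0 - PySem.List.pyGetD A j 0)
          else
            angle + (360 - PySem.List.pyGetD A j 0 + PySem.List.pyGetD A i 0)) 0
        if maxAngle < angle then angle else maxAngle) 0
        = ((PySem.List.pyRange 0 N 1).map (fun i => pvH N vals (PySem.List.pyGetD A i 0))).foldl max 0 := by
      rw [List.foldl_map]
      apply PySem.List.foldl_congr_mem
      intro acc i hi
      obtain ⟨hi0, hiN⟩ := PySem.List.mem_pyRange_one.mp hi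
      have hinner := pvInner N i A hi0 hiN hpre
      simp only []
      rw [hinner, pvSumG]
      have : ((A.take N.toNat).length : Int) = N := by
        rw [List.length_take]; push_cast; omega
      rw [this]
      rw [pvH, ← hL, hsum, hcnt]
      split_ifs <;> omega
    rw [hAside]
    -- B side
    rw [show ((PySem.List.enumerate vals 0).foldl (fun best p =>
        max best (N * p.2 - vals.sum + 360 * (N - p.1 - 1))) 0)
        = ((PySem.List.enumerate vals 0).map (pvCand N vals.sum)).foldl max 0 by
      rw [List.foldl_map]; rfl]
    -- max-fold equality
    apply pvFoldMaxEq
    · intro x hx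
      obtain ⟨i, hi, rfl⟩ := List.mem_map.mp hx
      obtain ⟨hi0, hiN'⟩ := PySem.List.mem_pyRange_one.mp hi
      set v := PySem.List.pyGetD A i 0 with hv
      have hvmem : v ∈ vals := by
        rw [hvals, PySem.List.mem_sorted]
        rw [hv, PySem.List.pyGetD_eq_getElem A 0 hi0 (by omega)]
        have hlt : i.toNat < L.length := by rw [hL, List.length_take]; omega
        exact List.mem_iff_getElem.mpr ⟨i.toNat, hlt, by simp [hL, List.getElem_take]⟩
      obtain ⟨k, hk, hvk, hcount⟩ := pvFirst vals hpair v hvmem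
      refine ⟨pvCand N vals.sum ((0:Int) + (k:Nat), vals[k]), List.mem_map.mpr
        ⟨((0:Int) + (k:Nat), vals[k]), (PySem.List.mem_enumerate_iff vals 0 _).mpr ⟨k, hk, rfl⟩, rfl⟩, ?_⟩
      rw [pvH, pvCand, hcount]
      dsimp only
      have hmul : N * v ≤ N * vals[k] := mul_le_mul_of_nonneg_left hvk (by omega)
      have hkN : (k : Int) < N := by have h1 := hlenv; have h2 := hk; omega
      have hsub : ((vals.length - k : Nat) : Int) = N - k := by
        have h1 := hlenv; have h2 := hk; omega
      rw [hsub]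
      linarith [hmul]
    · intro y hy
      obtain ⟨p, hp, rfl⟩ := List.mem_map.mp hy
      obtain ⟨k, hk, rfl⟩ := (PySem.List.mem_enumerate_iff vals 0 p).mp hp
      set v := vals[k] with hvdef
      have hvL : v ∈ L := by
        rw [← PySem.List.mem_sorted L (fun x => x) false, ← hvals]
        exact List.getElem_mem _
      obtain ⟨i, hiL, hieq⟩ := List.mem_iff_getElem.mp hvL
      have hiA : PySem.List.pyGetD A (i : Int) 0 = v := by
        rw [PySem.List.pyGetD_natCast, List.getD_eq_getElem _ _ (by rw [hL, List.length_take] at hiL; omega)]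
        rw [← hieq]
        simp only [hL, List.getElem_take]
      refine ⟨pvH N vals (PySem.List.pyGetD A (i:Int) 0), List.mem_map.mpr
        ⟨(i:Int), PySem.List.mem_pyRange_one.mpr ⟨by omega, by rw [hL, List.length_take] at hiL; omega⟩, rfl⟩, ?_⟩
      rw [hiA, pvH, pvCand]
      dsimp only
      have hcge := pvCount_ge vals hpair k hk
      simp only [← hvdef] at hcge
      have h1 : (vals.length : Int) - (k : Int) ≤ (vals.countP (fun a => v ≤ a) : Int) := by
        have h2 := hk; omega
      have hlv : (vals.length : Int) = N := by have h2 := hlenv; omega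
      linarith

-- ===== VERDICT (by name: the statement is the Claim_ definition above) =====
theorem calMaxAngle_spec : Claim_equal_calMaxAngle := by
  intro N A _ hpre
  unfold Spec_calMaxAngle
  exact pvMain N A hpre
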